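-- pv_equiv track=rewrite | github.com/softkleenex/arc-prize-2025-gold | ensemble_solver.py | learn_color_map
-- ===== SOURCE A (Python) =====
-- from typing import List, Dict, Tuple, Optional, Any
--
-- def learn_color_map(train_examples: List[Dict]) -> Dict[int, int]:
--     """Learn color mapping from examples"""
--     all_mappings = []
--
--     for ex in train_examples:
--         in_grid = ex['input']
--         out_grid = ex['output']
--
--         if len(in_grid) == len(out_grid) and len(in_grid[0]) == len(out_grid[0]):
--             mapping = {}
--             for i in range(len(in_grid)):
--                 for j in range(len(in_grid[0])):
--                     if in_grid[i][j] != 0: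
--                         mapping[in_grid[i][j]] = out_grid[i][j]
--             all_mappings.append(mapping)
--
--     # Consensus mapping
--     final_map = {}
--     if all_mappings:
--         all_keys = set()
--         for m in all_mappings:
--             all_keys.update(m.keys())
--
--         for key in all_keys:
--             values = [m.get(key) for m in all_mappings if key in m]
--             if values and all(v == values[0] for v in values):
--                 final_map[key] = values[0]
--
--     return final_map
-- ===== SOURCE B (Python) =====
-- from typing import List, Dict
--
-- def learn_color_map(train_examples: List[Dict]) -> Dict[int, int]:
--     """Learn color mapping from examples (streaming consensus)"""
--     consensus = {}
--     conflicts = set()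
--
--     for ex in train_examples:
--         in_grid = ex['input']
--         out_grid = ex['output']
--
--         if len(in_grid) == len(out_grid) and len(in_grid[0]) == len(out_grid[0]):
--             mapping = {}
--             for i in range(len(in_grid)):
--                 for j in range(len(in_grid[0])):
--                     if in_grid[i][j] != 0:
--                         mapping[in_grid[i][j]] = out_grid[i][j]
--
--             for k, v in mapping.items():
--                 if k in conflicts:
--                     continue
--                 if k in consensus:
--                     if consensus[k] != v:
--                         del consensus[k]
--                         conflicts.add(k)
--                 else:
--                     consensus[k] = v
--
--     return consensus
-- ===== Notes on version B (the rewrite author's own statement) =====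
-- stated objective: faster
-- what changed: The per-example mapping construction is kept, but the consensus phase no longer collects all mappings, unions their key sets and rescans every mapping for every key; instead one streaming pass maintains a consensus dict and a conflicts set, installing each key on first sight and permanently invalidating it on the first disagreement.
import Mathlib
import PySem

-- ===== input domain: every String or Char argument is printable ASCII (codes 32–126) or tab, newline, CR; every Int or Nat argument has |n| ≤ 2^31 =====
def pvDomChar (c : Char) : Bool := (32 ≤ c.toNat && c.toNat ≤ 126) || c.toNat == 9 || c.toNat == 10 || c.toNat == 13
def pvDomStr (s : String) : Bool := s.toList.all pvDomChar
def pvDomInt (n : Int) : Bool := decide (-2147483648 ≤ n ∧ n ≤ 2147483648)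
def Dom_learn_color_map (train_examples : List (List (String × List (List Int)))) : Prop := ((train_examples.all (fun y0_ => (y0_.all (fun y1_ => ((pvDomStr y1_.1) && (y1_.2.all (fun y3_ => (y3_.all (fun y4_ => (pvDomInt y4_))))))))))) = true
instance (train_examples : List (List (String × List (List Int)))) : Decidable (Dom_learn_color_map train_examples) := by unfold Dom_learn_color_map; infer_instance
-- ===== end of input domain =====

-- B keeps A's per-example mapping construction but replaces the collect-then-rescan consensus
-- phase by one streaming pass with a consensus dict and a conflicts set (objective: faster).

-- ===== PORT A =====
-- Shared by both ports: the per-example mapping construction (identical double loop in both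
-- Pythons: dimension guard, row-major scan, last-write-wins dict insert).  Where the Python
-- raises (missing 'input'/'output' key, in_grid[0] on an empty grid, a short row) the total
-- form returns none / a default; those inputs are excluded by Pre_learn_color_map.
def pvBuildMapping (ig og : List (List Int)) : PySem.Dict Int Int :=
  (PySem.List.pyRange 0 (ig.length : Int) 1).foldl (fun m i =>
    (PySem.List.pyRange 0 ((PySem.List.pyGetD ig 0 []).length : Int) 1).foldl (fun m j =>
      if PySem.List.pyGetD (PySem.List.pyGetD ig i []) j 0 ≠ 0 then
        m.insert (PySem.List.pyGetD (PySem.List.pyGetD ig i []) j 0)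
                 (PySem.List.pyGetD (PySem.List.pyGetD og i []) j 0)
      else m) m) PySem.Dict.empty

def pvMapping? (ex : List (String × List (List Int))) : Option (PySem.Dict Int Int) :=
  match (PySem.Dict.mk ex).get? "input", (PySem.Dict.mk ex).get? "output" with
  | some ig, some og =>
      if ig.length = og.length ∧
         (PySem.List.pyGetD ig 0 []).length = (PySem.List.pyGetD og 0 []).length
      then some (pvBuildMapping ig og)
      else none
  | _, _ => none

def learn_color_map (train_examples : List (List (String × List (List Int)))) : List (Int × Int) :=
  let all_mappings : List (PySem.Dict Int Int) :=
    train_examples.foldl (fun acc ex =>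
      match pvMapping? ex with
      | some m => acc ++ [m]
      | none => acc) []
  let final_map : PySem.Dict Int Int :=
    if all_mappings.isEmpty then PySem.Dict.empty
    else
      let all_keys : PySem.Set Int :=
        all_mappings.foldl (fun s m => PySem.Set.update s m.keys) PySem.Set.empty
      all_keys.foldl (fun fm key =>
        let values : List (Option Int) :=
          all_mappings.filterMap (fun m => if m.contains key then some (m.get? key) else none)
        match values with
        | [] => fm
        | v0 :: _ =>
          if values.all (· == v0) then
            match v0 with
            | some v => fm.insert key v
            | none => fm
          else fm) PySem.Dict.empty
  final_map.items

-- ===== PORT B =====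
def learn_color_map_alt (train_examples : List (List (String × List (List Int)))) : List (Int × Int) :=
  (train_examples.foldl (fun (st : PySem.Dict Int Int × PySem.Set Int) ex =>
      match pvMapping? ex with
      | none => st
      | some mapping =>
        mapping.items.foldl (fun st kv =>
          if st.2.contains kv.1 then st
          else if st.1.contains kv.1 then
            if st.1.get? kv.1 ≠ some kv.2 then (st.1.erase kv.1, st.2.add kv.1) else st
          else (st.1.insert kv.1 kv.2, st.2)) st)
    (PySem.Dict.empty, PySem.Set.empty)).1.items

-- ===== PRECONDITION & SPEC =====
-- Pre_ excludes exactly the inputs where the Python A raises: an example missing the 'input' or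
-- 'output' key (KeyError), equal-height grids with an empty input grid (IndexError on in_grid[0]),
-- an input row shorter than the first row, or a too-short output row reached at a nonzero cell.
def pvPreEx (ex : List (String × List (List Int))) : Bool :=
  match (PySem.Dict.mk ex).get? "input", (PySem.Dict.mk ex).get? "output" with
  | some ig, some og =>
    if ig.length = og.length then
      match ig, og with
      | r0 :: _, s0 :: _ =>
        if r0.length = s0.length then
          (List.range ig.length).all (fun i =>
            (List.range r0.length).all (fun j =>
              decide (j < (ig.getD i []).length) &&
              ((ig.getD i []).getD j 0 == 0 || decide (j < (og.getD i []).length))))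
        else true
      | _, _ => false
    else true
  | _, _ => false

def Pre_learn_color_map (train_examples : List (List (String × List (List Int)))) : Prop :=
  train_examples.all pvPreEx = true
instance (train_examples : List (List (String × List (List Int)))) : Decidable (Pre_learn_color_map train_examples) := by
  unfold Pre_learn_color_map; infer_instance

def pvWitness_learn_color_map : (List (List (String × List (List Int)))) :=
  [[("input", [[1, 0], [2, 1]]), ("output", [[3, 0], [4, 3]])]]

def Spec_learn_color_map (train_examples : List (List (String × List (List Int)))) (out : List (Int × Int)) : Prop := out = learn_color_map_alt train_examples
instance (train_examples : List (List (String × List (List Int)))) (out : List (Int × Int)) : Decidable (Spec_learn_color_map train_examples out) := by unfold Spec_learn_color_map; infer_instance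

-- ===== CLAIM (what is proved, stated in full; the proofs are below) =====
def Claim_equal_learn_color_map : Prop := ∀ (train_examples : List (List (String × List (List Int)))), Dom_learn_color_map train_examples → Pre_learn_color_map train_examples → Spec_learn_color_map train_examples (learn_color_map train_examples)

-- ===== LEMMAS AND PROOFS =====

-- The list of per-example mappings A collects (and B streams through).
def pvMaps (train_examples : List (List (String × List (List Int)))) : List (PySem.Dict Int Int) :=
  train_examples.filterMap pvMapping?

-- The value list a key collects across the mappings, in mapping order.
def pvVals (ms : List (PySem.Dict Int Int)) (k : Int) : List Int :=
  ms.filterMap (fun m => m.get? k)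

-- All keys, in first-occurrence order (exactly A's all_keys set).
def pvKeys (ms : List (PySem.Dict Int Int)) : PySem.Set Int :=
  ms.foldl (fun s m => PySem.Set.update s m.keys) PySem.Set.empty

-- The consensus value of a key, if its occurrences exist and agree.
def pvVal (ms : List (PySem.Dict Int Int)) (k : Int) : Option Int :=
  match pvVals ms k with
  | [] => none
  | v :: t => if t.all (· == v) then some v else none

def pvGood (ms : List (PySem.Dict Int Int)) (k : Int) : Option (Int × Int) :=
  (pvVal ms k).map (fun v => (k, v))

def pvBad (ms : List (PySem.Dict Int Int)) (k : Int) : Prop :=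
  match pvVals ms k with
  | [] => False
  | v :: t => ¬ t.all (· == v) = true

-- The common reference result.
def pvSpec (ms : List (PySem.Dict Int Int)) : List (Int × Int) :=
  (pvKeys ms).filterMap (pvGood ms)

-- B's loop invariant.
def pvInv (ms : List (PySem.Dict Int Int)) (st : PySem.Dict Int Int × PySem.Set Int) : Prop :=
  st.1 = PySem.Dict.mk (pvSpec ms) ∧ ∀ j, (j ∈ st.2 ↔ pvBad ms j)


-- B's inner step (literally the lambda of learn_color_map_alt's inner loop).
def pvIStep (st : PySem.Dict Int Int × PySem.Set Int) (kv : Int × Int) :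
    PySem.Dict Int Int × PySem.Set Int :=
  if st.2.contains kv.1 then st
  else if st.1.contains kv.1 then
    if st.1.get? kv.1 ≠ some kv.2 then (st.1.erase kv.1, st.2.add kv.1) else st
  else (st.1.insert kv.1 kv.2, st.2)

lemma pv_nodup_fold {α : Type} (l : List α) (f : PySem.Dict Int Int → α → PySem.Dict Int Int)
    (h : ∀ d a, d.keys.Nodup → (f d a).keys.Nodup) :
    ∀ d : PySem.Dict Int Int, d.keys.Nodup → (l.foldl f d).keys.Nodup := by
  induction l with
  | nil => intro d hd; exact hd
  | cons a l ih => intro d hd; exact ih (f d a) (h d a hd)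

lemma pvBuildMapping_nodup (ig og : List (List Int)) : (pvBuildMapping ig og).keys.Nodup := by
  unfold pvBuildMapping
  apply pv_nodup_fold
  · intro d i hd
    apply pv_nodup_fold
    · intro d' j hd'
      split
      · exact PySem.Dict.nodup_keys_insert _ _ _ hd'
      · exact hd'
    · exact hd
  · exact PySem.Dict.nodup_keys_empty

lemma pvMaps_nodup (train : List (List (String × List (List Int)))) :
    ∀ m ∈ pvMaps train, m.keys.Nodup := by
  intro m hm
  unfold pvMaps at hm
  obtain ⟨ex, _, hex⟩ := List.mem_filterMap.mp hm
  unfold pvMapping? at hex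
  split at hex
  · split at hex
    · cases hex; exact pvBuildMapping_nodup _ _
    · cases hex
  · cases hex

lemma pv_allmaps (train : List (List (String × List (List Int))))
    (acc : List (PySem.Dict Int Int)) :
    train.foldl (fun acc ex =>
      match pvMapping? ex with
      | some m => acc ++ [m]
      | none => acc) acc = acc ++ pvMaps train := by
  induction train generalizing acc with
  | nil => simp [pvMaps]
  | cons ex train ih =>
    simp only [List.foldl_cons]
    cases hex : pvMapping? ex with
    | none => simp [pvMaps, hex, ih]
    | some m => simp [pvMaps, hex, ih]

lemma pv_bfold (train : List (List (String × List (List Int))))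
    (st : PySem.Dict Int Int × PySem.Set Int) :
    train.foldl (fun st ex =>
      match pvMapping? ex with
      | none => st
      | some mapping => mapping.items.foldl pvIStep st) st
      = (pvMaps train).foldl (fun st m => m.items.foldl pvIStep st) st := by
  induction train generalizing st with
  | nil => simp [pvMaps]
  | cons ex train ih =>
    simp only [List.foldl_cons]
    cases hex : pvMapping? ex with
    | none => simp [pvMaps, hex, ih]
    | some m => simp [pvMaps, hex, ih]

lemma pvVals_append (ms : List (PySem.Dict Int Int)) (d : PySem.Dict Int Int) (k : Int) :
    pvVals (ms ++ [d]) k = pvVals ms k ++ (d.get? k).toList := by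
  unfold pvVals
  rw [List.filterMap_append]
  cases hd : d.get? k <;> simp [hd]

lemma pvKeys_append (ms : List (PySem.Dict Int Int)) (d : PySem.Dict Int Int) :
    pvKeys (ms ++ [d]) = PySem.Set.update (pvKeys ms) d.keys := by
  unfold pvKeys
  rw [List.foldl_append]
  rfl

lemma pvKeys_nodup (ms : List (PySem.Dict Int Int)) : (pvKeys ms).Nodup := by
  induction ms using List.reverseRecOn with
  | nil => simp [pvKeys]
  | append_singleton ms d ih => rw [pvKeys_append]; exact PySem.Set.nodup_update _ _ ih

lemma pv_mem_of_vals_ne (ms : List (PySem.Dict Int Int)) (k : Int)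
    (h : pvVals ms k ≠ []) : k ∈ pvKeys ms := by
  induction ms using List.reverseRecOn with
  | nil => simp [pvVals] at h
  | append_singleton ms d ih =>
    rw [pvVals_append] at h
    rw [pvKeys_append, PySem.Set.mem_update]
    cases hd : d.get? k with
    | none =>
      left; apply ih; simpa [hd] using h
    | some v =>
      right
      exact PySem.Dict.mem_keys_of_mem_items d (PySem.Dict.mem_items_of_get?_eq_some d hd)

lemma pv_vals_ne_of_mem (ms : List (PySem.Dict Int Int)) (k : Int)
    (h : k ∈ pvKeys ms) : pvVals ms k ≠ [] := by
  induction ms using List.reverseRecOn with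
  | nil => simp [pvKeys] at h
  | append_singleton ms d ih =>
    rw [pvKeys_append, PySem.Set.mem_update] at h
    rw [pvVals_append]
    rcases h with h | h
    · intro hc
      exact ih h (by simpa using (List.append_eq_nil_iff.mp hc).1)
    · intro hc
      have h2 := (List.append_eq_nil_iff.mp hc).2
      cases hd : d.get? k with
      | some v => simp [hd] at h2
      | none => exact (PySem.Dict.get?_eq_none_iff_not_mem_keys _ _ |>.mp hd) h

lemma pvGood_fst (ms : List (PySem.Dict Int Int)) (k : Int) (p : Int × Int)
    (h : pvGood ms k = some p) : p.1 = k := by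
  unfold pvGood at h
  cases hv : pvVal ms k <;> simp [hv] at h
  subst h; rfl

lemma pv_find_filterMap (g : Int → Option (Int × Int))
    (hg : ∀ k p, g k = some p → p.1 = k) (j : Int) :
    ∀ ks : List Int, ks.Nodup →
      ((ks.filterMap g).find? (fun p => p.1 == j)) = if j ∈ ks then g j else none := by
  intro ks
  induction ks with
  | nil => simp
  | cons k ks ih =>
    intro hnd
    have hnd' := (List.nodup_cons.mp hnd).2
    have hk : k ∉ ks := (List.nodup_cons.mp hnd).1
    cases hg0 : g k with
    | none =>
      rw [List.filterMap_cons_none hg0, ih hnd']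
      by_cases hj : j = k
      · subst hj; simp [hk, hg0]
      · simp [hj]
    | some p =>
      have hp1 : p.1 = k := hg k p hg0
      rw [List.filterMap_cons_some hg0]
      by_cases hj : j = k
      · subst hj; simp [hp1, hg0]
      · have : (p.1 == j) = false := by simp [hp1]; omega
        simp [this, ih hnd', hj]

lemma pvSpec_get? (ms : List (PySem.Dict Int Int)) (j : Int) :
    (PySem.Dict.mk (pvSpec ms)).get? j = pvVal ms j := by
  show ((pvSpec ms).find? (fun p => p.1 == j)).map (·.2) = pvVal ms j
  unfold pvSpec
  rw [pv_find_filterMap (pvGood ms) (fun k p h => pvGood_fst ms k p h) j (pvKeys ms) (pvKeys_nodup ms)]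
  by_cases hj : j ∈ pvKeys ms
  · simp only [hj, if_pos]
    unfold pvGood
    cases pvVal ms j <;> simp
  · have : pvVals ms j = [] := by
      by_contra hne
      exact hj (pv_mem_of_vals_ne ms j hne)
    simp [hj, pvVal, this]

lemma pvSpec_contains (ms : List (PySem.Dict Int Int)) (j : Int) :
    (PySem.Dict.mk (pvSpec ms)).contains j = (pvVal ms j).isSome := by
  rw [PySem.Dict.contains_eq_isSome_get?, pvSpec_get?]

lemma pv_filterMap_invalidate (g₁ g₂ : Int → Option (Int × Int)) (k : Int)
    (hg : ∀ j, j ≠ k → g₂ j = g₁ j) (hk : g₂ k = none)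
    (hfst : ∀ j p, g₁ j = some p → p.1 = j) :
    ∀ ks : List Int, ks.filterMap g₂ = (ks.filterMap g₁).filter (fun p => !(p.1 == k)) := by
  intro ks
  induction ks with
  | nil => simp
  | cons j ks ih =>
    by_cases hj : j = k
    · subst hj
      rw [List.filterMap_cons_none hk]
      cases hg1 : g₁ j with
      | none => rw [List.filterMap_cons_none hg1]; exact ih
      | some p =>
        rw [List.filterMap_cons_some hg1]
        have : p.1 = j := hfst j p hg1
        simp only [List.filter_cons, this]
        simp [ih]
    · rw [List.filterMap_cons, List.filterMap_cons, hg j hj]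
      cases hg1 : g₁ j with
      | none => simpa using ih
      | some p =>
        have hp1 : p.1 = j := hfst j p hg1
        simp only [List.filter_cons, hp1]
        have : (j == k) = false := by simp [hj]
        simp [this, ih]

lemma pv_foldl_condInsert (g : Int → Option Int) :
    ∀ (ks : List Int) (fm : PySem.Dict Int Int), ks.Nodup →
      (∀ k ∈ ks, fm.contains k = false) →
      (ks.foldl (fun fm k => match g k with | some v => fm.insert k v | none => fm) fm).items
        = fm.items ++ ks.filterMap (fun k => (g k).map (fun v => (k, v))) := by
  intro ks
  induction ks with
  | nil => intro fm _ _; simp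
  | cons k ks ih =>
    intro fm hnd hfresh
    have hk : k ∉ ks := (List.nodup_cons.mp hnd).1
    have hnd' := (List.nodup_cons.mp hnd).2
    simp only [List.foldl_cons]
    cases hg0 : g k with
    | none =>
      rw [List.filterMap_cons_none (by simp [hg0])]
      exact ih fm hnd' (fun k' hk' => hfresh k' (List.mem_cons_of_mem _ hk'))
    | some v =>
      simp only [hg0, List.filterMap_cons, Option.map_some]
      rw [ih (fm.insert k v) hnd' ?_]
      · rw [PySem.Dict.items_insert_of_not_contains fm v (hfresh k List.mem_cons_self)]
        simp
      · intro k' hk'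
        rw [PySem.Dict.contains_insert]
        have : k' ≠ k := fun h => hk (h ▸ hk')
        simp [this, hfresh k' (List.mem_cons_of_mem _ hk')]

lemma pv_values_eq (ms : List (PySem.Dict Int Int)) (k : Int) :
    ms.filterMap (fun m => if m.contains k then some (m.get? k) else none)
      = (pvVals ms k).map some := by
  induction ms with
  | nil => simp [pvVals]
  | cons m ms ih =>
    cases hm : m.get? k with
    | none =>
      have hc : m.contains k = false := by
        rw [PySem.Dict.contains_eq_isSome_get?, hm]; rfl
      simpa [pvVals, List.filterMap_cons, hc, hm] using ih
    | some v =>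
      have hc : m.contains k = true := by
        rw [PySem.Dict.contains_eq_isSome_get?, hm]; rfl
      simpa [pvVals, List.filterMap_cons, hc, hm] using ih

lemma pv_abody (ms : List (PySem.Dict Int Int)) (fm : PySem.Dict Int Int) (k : Int) :
    (let values : List (Option Int) :=
        ms.filterMap (fun m => if m.contains k then some (m.get? k) else none)
     match values with
     | [] => fm
     | v0 :: _ =>
       if values.all (· == v0) then
         match v0 with
         | some v => fm.insert k v
         | none => fm
       else fm)
    = match pvVal ms k with | some v => fm.insert k v | none => fm := by
  simp only [pv_values_eq]
  cases hv : pvVals ms k with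
  | nil => simp [pvVal, hv]
  | cons v t =>
    have hall : ((some v :: t.map some).all (· == some v)) = t.all (· == v) := by
      rw [List.all_cons, List.all_map]
      have h1 : (some v == some v) = true := by simp
      rw [h1, Bool.true_and]; rfl
    cases ht : t.all (· == v) <;> simp [pvVal, hv, hall, ht]

lemma pvA_fold (ms : List (PySem.Dict Int Int)) :
    ((pvKeys ms).foldl (fun fm key =>
      match (ms.filterMap (fun m => if m.contains key then some (m.get? key) else none) :
          List (Option Int)) with
      | [] => fm
      | v0 :: _ =>
        if (ms.filterMap (fun m => if m.contains key then some (m.get? key) else none)).all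
            (· == v0) then
          match v0 with
          | some v => fm.insert key v
          | none => fm
        else fm) PySem.Dict.empty).items = pvSpec ms := by
  have hfun : (fun (fm : PySem.Dict Int Int) key =>
      match (ms.filterMap (fun m => if m.contains key then some (m.get? key) else none) :
          List (Option Int)) with
      | [] => fm
      | v0 :: _ =>
        if (ms.filterMap (fun m => if m.contains key then some (m.get? key) else none)).all
            (· == v0) then
          match v0 with
          | some v => fm.insert key v
          | none => fm
        else fm)
      = (fun fm k => match pvVal ms k with | some v => fm.insert k v | none => fm) := by
    funext fm k
    exact pv_abody ms fm k
  rw [hfun, pv_foldl_condInsert (pvVal ms) (pvKeys ms) PySem.Dict.empty (pvKeys_nodup ms)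
    (fun k _ => PySem.Dict.contains_empty k)]
  rfl

lemma pvA (train : List (List (String × List (List Int)))) :
    learn_color_map train = pvSpec (pvMaps train) := by
  simp only [learn_color_map, pv_allmaps train [], List.nil_append]
  cases h : pvMaps train with
  | nil => rfl
  | cons m ms' =>
    rw [← h]
    have hne : (pvMaps train).isEmpty = false := by simp [h]
    simp only [hne, Bool.false_eq_true, if_false]
    exact pvA_fold (pvMaps train)

lemma pvInv_congr' (ms₁ ms₂ : List (PySem.Dict Int Int))
    (st : PySem.Dict Int Int × PySem.Set Int)
    (hgood : ∀ j, pvGood ms₂ j = pvGood ms₁ j) (hk : pvKeys ms₂ = pvKeys ms₁)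
    (hbad : ∀ j, pvBad ms₂ j ↔ pvBad ms₁ j)
    (h : pvInv ms₁ st) : pvInv ms₂ st := by
  have hspec : pvSpec ms₂ = pvSpec ms₁ := by
    unfold pvSpec; rw [hk]; exact List.filterMap_congr (fun x _ => hgood x)
  exact ⟨hspec ▸ h.1, fun j => (h.2 j).trans (hbad j).symm⟩

lemma pvInv_congr (ms₁ ms₂ : List (PySem.Dict Int Int))
    (st : PySem.Dict Int Int × PySem.Set Int)
    (hv : ∀ j, pvVals ms₂ j = pvVals ms₁ j) (hk : pvKeys ms₂ = pvKeys ms₁)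
    (h : pvInv ms₁ st) : pvInv ms₂ st := by
  refine pvInv_congr' ms₁ ms₂ st ?_ hk ?_ h
  · intro j; unfold pvGood pvVal; rw [hv j]
  · intro j; unfold pvBad; rw [hv j]

lemma pvVal_some (ms : List (PySem.Dict Int Int)) (k w : Int)
    (h : pvVal ms k = some w) :
    ∃ t, pvVals ms k = w :: t ∧ t.all (· == w) = true := by
  unfold pvVal at h
  cases hv : pvVals ms k with
  | nil =>
    rw [hv] at h
    simp at h
  | cons a t =>
    rw [hv] at h
    have h' : (if t.all (· == a) = true then some a else none) = some w := h
    by_cases ht : t.all (· == a) = true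
    · rw [if_pos ht] at h'
      obtain rfl : a = w := Option.some.inj h'
      exact ⟨t, rfl, ht⟩
    · rw [if_neg ht] at h'
      simp at h'


lemma pvVal_none (ms : List (PySem.Dict Int Int)) (k : Int)
    (h : pvVal ms k = none) (hb : ¬ pvBad ms k) : pvVals ms k = [] := by
  unfold pvVal at h
  unfold pvBad at hb
  cases hv : pvVals ms k with
  | nil => rfl
  | cons a t =>
    rw [hv] at h hb
    have h' : (if t.all (· == a) = true then some a else none) = (none : Option Int) := h
    have hb' : ¬ ¬ t.all (· == a) = true := hb
    by_cases ht : t.all (· == a) = true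
    · rw [if_pos ht] at h'
      simp at h'
    · exact absurd (not_not.mp hb') ht

lemma pvVal_cons (ms : List (PySem.Dict Int Int)) (k a : Int) (t : List Int)
    (h : pvVals ms k = a :: t) :
    pvVal ms k = if t.all (· == a) = true then some a else none := by
  unfold pvVal; rw [h]

lemma pvB_step (ms₁ ms₂ : List (PySem.Dict Int Int)) (k v : Int)
    (st : PySem.Dict Int Int × PySem.Set Int)
    (hv : ∀ j, pvVals ms₂ j = pvVals ms₁ j ++ (if j = k then [v] else []))
    (hk2 : pvKeys ms₂ = PySem.Set.add (pvKeys ms₁) k)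
    (hinv : pvInv ms₁ st) :
    pvInv ms₂ (pvIStep st (k, v)) := by
  obtain ⟨C, F⟩ := st
  have hC : C = PySem.Dict.mk (pvSpec ms₁) := hinv.1
  have hF : ∀ j, j ∈ F ↔ pvBad ms₁ j := hinv.2
  have hvk : pvVals ms₂ k = pvVals ms₁ k ++ [v] := by rw [hv k]; simp
  have hvj : ∀ j, j ≠ k → pvVals ms₂ j = pvVals ms₁ j := by
    intro j hj; rw [hv j]; simp [hj]
  have hgoodj : ∀ j, j ≠ k → pvGood ms₂ j = pvGood ms₁ j := by
    intro j hj; unfold pvGood pvVal; rw [hvj j hj]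
  have hbadj : ∀ j, j ≠ k → (pvBad ms₂ j ↔ pvBad ms₁ j) := by
    intro j hj; unfold pvBad; rw [hvj j hj]
  show pvInv ms₂ (if F.contains k = true then (C, F)
    else if C.contains k = true then
      (if C.get? k ≠ some v then (C.erase k, F.add k) else (C, F))
    else (C.insert k v, F))
  cases hFc : F.contains k with
  | true =>
    -- k already conflicted: skipped; it stays conflicted and produces no entry.
    rw [if_pos rfl]
    have hbk : pvBad ms₁ k := (hF k).mp (PySem.Set.contains_iff F k |>.mp hFc)
    obtain ⟨a, t, hv1⟩ : ∃ a t, pvVals ms₁ k = a :: t := by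
      cases hv1 : pvVals ms₁ k with
      | nil => exact absurd hbk (by unfold pvBad; rw [hv1]; exact not_false)
      | cons a t => exact ⟨a, t, rfl⟩
    have hnall : ¬ t.all (· == a) = true := by
      have h' := hbk; unfold pvBad at h'; rw [hv1] at h'; exact h'
    have hv2 : pvVals ms₂ k = a :: (t ++ [v]) := by rw [hvk, hv1]; rfl
    have hbad2 : pvBad ms₂ k := by
      unfold pvBad; rw [hv2]
      simp only [List.all_append, Bool.and_eq_true, not_and]
      exact fun h => absurd h hnall
    have hkeys : pvKeys ms₂ = pvKeys ms₁ := by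
      rw [hk2, PySem.Set.add_of_mem (pv_mem_of_vals_ne ms₁ k (by rw [hv1]; simp))]
    refine pvInv_congr' ms₁ ms₂ (C, F) ?_ hkeys ?_ ⟨hC, hF⟩
    · intro j
      by_cases hj : j = k
      · rw [hj]
        unfold pvGood
        rw [pvVal_cons ms₁ k a t hv1, pvVal_cons ms₂ k a (t ++ [v]) hv2]
        have hn2 : ¬ (t ++ [v]).all (· == a) = true := by
          rw [List.all_append, Bool.and_eq_true]
          exact fun h => hnall h.1
        rw [if_neg hnall, if_neg hn2]
      · exact hgoodj j hj
    · intro j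
      by_cases hj : j = k
      · subst hj; exact ⟨fun _ => hbk, fun _ => hbad2⟩
      · exact hbadj j hj
  | false =>
    rw [if_neg Bool.false_ne_true]
    have hnF : k ∉ F := fun hmem =>
      absurd (PySem.Set.contains_iff F k |>.mpr hmem) (by rw [hFc]; exact Bool.false_ne_true)
    have hnbk : ¬ pvBad ms₁ k := fun hb => hnF ((hF k).mpr hb)
    cases hCc : C.contains k with
    | true =>
      rw [if_pos rfl]
      have hsome : (pvVal ms₁ k).isSome = true := by
        have h' := pvSpec_contains ms₁ k
        rw [← hC] at h'
        rw [← h']; exact hCc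
      obtain ⟨w, hw⟩ : ∃ w, pvVal ms₁ k = some w :=
        Option.isSome_iff_exists.mp hsome
      have hget : C.get? k = some w := by rw [hC, pvSpec_get?, hw]
      obtain ⟨t, hv1, hall⟩ := pvVal_some ms₁ k w hw
      have hv2 : pvVals ms₂ k = w :: (t ++ [v]) := by rw [hvk, hv1]; rfl
      have hkeys : pvKeys ms₂ = pvKeys ms₁ := by
        rw [hk2, PySem.Set.add_of_mem (pv_mem_of_vals_ne ms₁ k (by rw [hv1]; simp))]
      by_cases hwv : w = v
      · -- agreeing value: state unchanged, the key stays good with its first value.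
        subst hwv
        rw [if_neg (fun hcon => hcon hget)]
        refine pvInv_congr' ms₁ ms₂ (C, F) ?_ hkeys ?_ ⟨hC, hF⟩
        · intro j
          by_cases hj : j = k
          · rw [hj]
            unfold pvGood
            rw [pvVal_cons ms₁ k w t hv1, pvVal_cons ms₂ k w (t ++ [w]) hv2]
            have hall2 : (t ++ [w]).all (· == w) = true := by
              simp [List.all_append, hall]
            rw [if_pos hall, if_pos hall2]
          · exact hgoodj j hj
        · intro j
          by_cases hj : j = k
          · subst hj
            unfold pvBad
            rw [hv1, hv2]
            simp [hall]
          · exact hbadj j hj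
      · -- disagreement: the key is deleted from consensus and becomes conflicted.
        rw [if_pos (fun hcon : C.get? k = some v => hwv (Option.some.inj (hget ▸ hcon)))]
        have hnall2 : ¬ (t ++ [v]).all (· == w) = true := by
          simp only [List.all_append, Bool.and_eq_true, List.all_cons, List.all_nil,
            Bool.and_true, beq_iff_eq]
          exact fun h => hwv (h.2).symm
        have hbad2 : pvBad ms₂ k := by
          unfold pvBad; rw [hv2]; exact hnall2
        have hgood2 : pvGood ms₂ k = none := by
          unfold pvGood
          rw [pvVal_cons ms₂ k w (t ++ [v]) hv2, if_neg hnall2]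
          rfl
        constructor
        · show C.erase k = PySem.Dict.mk (pvSpec ms₂)
          rw [hC]
          show PySem.Dict.mk ((pvSpec ms₁).filter fun p => !(p.1 == k)) = _
          congr 1
          rw [show pvSpec ms₂ = (pvKeys ms₁).filterMap (pvGood ms₂) by
            unfold pvSpec; rw [hkeys]]
          rw [pv_filterMap_invalidate (pvGood ms₁) (pvGood ms₂) k hgoodj hgood2
            (fun j p h => pvGood_fst ms₁ j p h) (pvKeys ms₁)]
          rfl
        · intro j
          show j ∈ F.add k ↔ pvBad ms₂ j
          rw [PySem.Set.mem_add]
          by_cases hj : j = k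
          · subst hj; exact ⟨fun _ => hbad2, fun _ => Or.inr rfl⟩
          · rw [hbadj j hj]
            exact ⟨fun h => (hF j).mp (h.resolve_right hj), fun h => Or.inl ((hF j).mpr h)⟩
    | false =>
      -- genuinely new key: appended to consensus with its first value.
      rw [if_neg Bool.false_ne_true]
      have hnone : pvVal ms₁ k = none := by
        have h' := pvSpec_contains ms₁ k
        rw [← hC, hCc] at h'
        cases hx : pvVal ms₁ k with
        | none => rfl
        | some w => rw [hx] at h'; cases h'
      have hv1 : pvVals ms₁ k = [] := pvVal_none ms₁ k hnone hnbk
      have hnK : k ∉ pvKeys ms₁ := fun hmem => pv_vals_ne_of_mem ms₁ k hmem hv1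
      have hkeys : pvKeys ms₂ = pvKeys ms₁ ++ [k] := by
        rw [hk2, PySem.Set.add_of_not_mem hnK]
      have hv2 : pvVals ms₂ k = [v] := by rw [hvk, hv1]; rfl
      have hgood2 : pvGood ms₂ k = some (k, v) := by
        unfold pvGood
        rw [pvVal_cons ms₂ k v [] hv2]
        rfl
      constructor
      · show C.insert k v = PySem.Dict.mk (pvSpec ms₂)
        apply PySem.Dict.ext
        rw [PySem.Dict.items_insert_of_not_contains C v hCc, hC]
        show pvSpec ms₁ ++ [(k, v)] = pvSpec ms₂
        unfold pvSpec
        rw [hkeys, List.filterMap_append]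
        congr 1
        · exact List.filterMap_congr (fun j hj =>
            (hgoodj j (fun he => hnK (he ▸ hj))).symm)
        · rw [List.filterMap_cons_some hgood2]
          rfl
      · intro j
        show j ∈ F ↔ pvBad ms₂ j
        by_cases hj : j = k
        · subst hj
          constructor
          · exact fun hmem => absurd hmem hnF
          · intro hb
            exact absurd hb (by unfold pvBad; rw [hv2]; simp)
        · rw [hbadj j hj]; exact hF j

lemma pvB_inner :
    ∀ (p : List (Int × Int)) (ms : List (PySem.Dict Int Int))
      (st : PySem.Dict Int Int × PySem.Set Int),
      (p.map Prod.fst).Nodup → pvInv ms st →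
      pvInv (ms ++ [PySem.Dict.mk p]) (p.foldl pvIStep st) := by
  intro p
  induction p using List.reverseRecOn with
  | nil =>
    intro ms st _ hinv
    apply pvInv_congr ms
    · intro j
      rw [pvVals_append]
      show pvVals ms j ++ ((List.find? (fun p : Int × Int => p.1 == j) ([] : List (Int × Int))).map (fun q => q.2)).toList = pvVals ms j
      simp
    · rw [pvKeys_append]
      show PySem.Set.update _ ([] : List Int) = _
      rfl
    · exact hinv
  | append_singleton p kv ih =>
    obtain ⟨k, v⟩ := kv
    intro ms st hnd hinv
    rw [List.map_append] at hnd
    simp only [List.map_cons, List.map_nil] at hnd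
    have hp : (p.map Prod.fst).Nodup := (List.nodup_append.mp hnd).1
    have hkp : k ∉ p.map Prod.fst := by
      intro hmem
      rcases List.nodup_append.mp hnd with ⟨-, -, hdisj⟩
      exact hdisj k hmem k (List.mem_singleton.mpr rfl) rfl
    rw [List.foldl_append, List.foldl_cons, List.foldl_nil]
    have hfindp : p.find? (fun q => q.1 == k) = none := by
      rw [List.find?_eq_none]
      intro q hq
      simp only [beq_iff_eq]
      intro he
      exact hkp (he ▸ List.mem_map_of_mem hq)
    apply pvB_step (ms ++ [PySem.Dict.mk p]) _ k v _ ?_ ?_ (ih ms st hp hinv)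
    · intro j
      rw [pvVals_append, pvVals_append]
      show pvVals ms j ++ (((p ++ [(k, v)]).find? (fun q => q.1 == j)).map (·.2)).toList = _
      rw [List.find?_append]
      by_cases hj : j = k
      · rw [hj]
        simp [PySem.Dict.get?, hfindp]
      · have hkj : ((k, v).1 == j) = false := by
          simp only [beq_eq_false_iff_ne]
          exact fun h => hj h.symm
        have : List.find? (fun q => q.1 == j) [(k, v)] = none := by
          simp [hkj]
        rw [this, Option.or_none]
        show pvVals ms j ++ ((PySem.Dict.mk p).get? j).toList = _
        simp [hj]
    · rw [pvKeys_append, pvKeys_append]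
      show PySem.Set.update _ ((p ++ [(k, v)]).map Prod.fst) = _
      rw [List.map_append, PySem.Set.update_append]
      rfl

lemma pvB_inv (ms : List (PySem.Dict Int Int)) (hnd : ∀ m ∈ ms, m.keys.Nodup) :
    pvInv ms (ms.foldl (fun st m => m.items.foldl pvIStep st)
      (PySem.Dict.empty, PySem.Set.empty)) := by
  induction ms using List.reverseRecOn with
  | nil =>
    refine ⟨rfl, fun j => ?_⟩
    show j ∈ ([] : List Int) ↔ pvBad [] j
    simp [pvBad, pvVals]
  | append_singleton ms m ih =>
    rw [List.foldl_append, List.foldl_cons, List.foldl_nil]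
    have hm : m.keys.Nodup := hnd m (by simp)
    exact pvB_inner m.items ms _ hm
      (ih (fun m' hm' => hnd m' (List.mem_append_left _ hm')))

lemma pvB (train : List (List (String × List (List Int)))) :
    learn_color_map_alt train = pvSpec (pvMaps train) := by
  show (train.foldl (fun st ex =>
      match pvMapping? ex with
      | none => st
      | some mapping => mapping.items.foldl pvIStep st)
    (PySem.Dict.empty, PySem.Set.empty)).1.items = _
  rw [pv_bfold]
  rw [(pvB_inv (pvMaps train) (pvMaps_nodup train)).1]


-- ===== VERDICT (by name: the statement is the Claim_ definition above) =====
theorem learn_color_map_spec : Claim_equal_learn_color_map := by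
  intro train _ _
  unfold Spec_learn_color_map
  rw [pvA, pvB]
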